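-- pv_equiv track=rewrite | github.com/wojtask/CormenPy | test/test_chapter15/test_solutions.py | get_operations_cost
-- ===== SOURCE A (Python) =====
-- def get_operations_cost(operations, cost):
--     c = 0
--     for op in operations:
--         if op[:7] == 'replace':
--             c += cost['replace']
--         elif op[:6] == 'insert':
--             c += cost['insert']
--         else:
--             c += cost[op]
--     return c
-- ===== SOURCE B (Python) =====
-- def get_operations_cost(operations, cost):
--     counts = {}
--     for op in operations:
--         if op[:7] == 'replace':
--             k = 'replace'
--         elif op[:6] == 'insert':
--             k = 'insert'
--         else:
--             k = op
--         counts[k] = counts.get(k, 0) + 1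
--     return sum(n * cost[k] for k, n in counts.items())
-- ===== Notes on version B (the rewrite author's own statement) =====
-- stated objective: alternative
-- what changed: Instead of adding a cost per operation in one accumulating scan, B first aggregates the operations into a dict of counts keyed by effective cost category (insertion order) and then computes the total as a weighted sum over the distinct keys.
import Mathlib
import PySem

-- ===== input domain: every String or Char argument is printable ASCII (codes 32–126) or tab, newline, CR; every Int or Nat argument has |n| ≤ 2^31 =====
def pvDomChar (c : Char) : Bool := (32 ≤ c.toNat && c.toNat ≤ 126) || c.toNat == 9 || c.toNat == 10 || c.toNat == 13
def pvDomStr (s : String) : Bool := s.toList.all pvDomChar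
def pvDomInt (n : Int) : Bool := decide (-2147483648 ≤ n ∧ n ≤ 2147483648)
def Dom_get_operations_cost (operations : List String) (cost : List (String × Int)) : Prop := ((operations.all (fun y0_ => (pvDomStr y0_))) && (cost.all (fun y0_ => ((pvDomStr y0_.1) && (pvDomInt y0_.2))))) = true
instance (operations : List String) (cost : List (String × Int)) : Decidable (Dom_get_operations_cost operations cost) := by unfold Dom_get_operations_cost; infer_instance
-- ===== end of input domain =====

-- B aggregates operations into a count dict keyed by effective cost category, then takes a weighted
-- sum over the distinct keys (alternative decomposition; same asymptotic cost as A's single scan).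


-- ===== PORT A =====
def get_operations_cost (operations : List String) (cost : List (String × Int)) : Int :=
  operations.foldl (fun c op =>
    if PySem.Str.slice op none (some 7) = "replace" then
      c + (PySem.Dict.mk cost).getD "replace" 0
    else if PySem.Str.slice op none (some 6) = "insert" then
      c + (PySem.Dict.mk cost).getD "insert" 0
    else
      c + (PySem.Dict.mk cost).getD op 0) 0

-- ===== PORT B =====
def get_operations_cost_alt (operations : List String) (cost : List (String × Int)) : Int :=
  let counts := operations.foldl (fun d op =>
    let k := if PySem.Str.slice op none (some 7) = "replace" then "replace"
             else if PySem.Str.slice op none (some 6) = "insert" then "insert"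
             else op
    d.insert k (d.getD k 0 + 1)) PySem.Dict.empty
  counts.items.foldl (fun acc p => acc + p.2 * (PySem.Dict.mk cost).getD p.1 0) 0

-- ===== PRECONDITION & SPEC =====
-- the effective key an operation is charged under (shared by Pre_ and the proofs)
def pvKey (op : String) : String :=
  if PySem.Str.slice op none (some 7) = "replace" then "replace"
  else if PySem.Str.slice op none (some 6) = "insert" then "insert"
  else op

-- Pre_ excludes exactly the inputs on which A raises KeyError: some operation's effective key is absent from cost.
def Pre_get_operations_cost (operations : List String) (cost : List (String × Int)) : Prop :=
  ∀ op ∈ operations, (PySem.Dict.mk cost).contains (pvKey op) = true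
instance (operations : List String) (cost : List (String × Int)) : Decidable (Pre_get_operations_cost operations cost) := by unfold Pre_get_operations_cost; infer_instance

def pvWitness_get_operations_cost : List String × (List (String × Int)) :=
  (["replace_ab", "insertX", "delete", "delete"], [("replace", 3), ("insert", 2), ("delete", 5)])

def Spec_get_operations_cost (operations : List String) (cost : List (String × Int)) (out : Int) : Prop := out = get_operations_cost_alt operations cost
instance (operations : List String) (cost : List (String × Int)) (out : Int) : Decidable (Spec_get_operations_cost operations cost out) := by unfold Spec_get_operations_cost; infer_instance

-- ===== CLAIM (what is proved, stated in full; the proofs are below) =====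
def Claim_equal_get_operations_cost : Prop := ∀ (operations : List String) (cost : List (String × Int)), Dom_get_operations_cost operations cost → Pre_get_operations_cost operations cost → Spec_get_operations_cost operations cost (get_operations_cost operations cost)

-- ===== LEMMAS AND PROOFS =====

-- weighted sum of a dict's items under the cost table
def pvWSum (cost : List (String × Int)) (l : List (String × Int)) : Int :=
  (l.map (fun p => p.2 * (PySem.Dict.mk cost).getD p.1 0)).sum

-- incrementing the (unique) entry at key k adds w k to the weighted sum
lemma pvWSum_bump (cost : List (String × Int)) (l : List (String × Int)) (k : String) (v : Int) :
    (l.map (·.1)).Nodup → (k, v) ∈ l →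
    pvWSum cost (l.map (fun p => if p.1 == k then (k, v + 1) else p))
      = pvWSum cost l + (PySem.Dict.mk cost).getD k 0 := by
  induction l with
  | nil => intro _ hm; simp at hm
  | cons p l ih =>
    intro hnd hm
    simp only [List.map_cons, List.nodup_cons, List.mem_map] at hnd
    cases hm with
    | head =>
      have hrest : ∀ q ∈ l, q.1 ≠ k := by
        intro q hq hqk
        exact hnd.1 ⟨q, hq, hqk⟩
      have hid : l.map (fun p => if p.1 == k then (k, v + 1) else p) = l.map id :=
        List.map_congr_left (fun q hq => by simp [hrest q hq])
      simp only [pvWSum, List.map_cons, List.sum_cons]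
      rw [hid, List.map_id]
      simp
      ring
    | tail _ hm =>
      have hpk : p.1 ≠ k := by
        intro hpk
        exact hnd.1 ⟨(k, v), hm, by simp [hpk]⟩
      have hrec := ih hnd.2 hm
      simp only [pvWSum, List.map_cons, List.sum_cons, beq_iff_eq] at hrec ⊢
      rw [if_neg hpk, hrec]
      ring

-- one insert-with-increment step adds w k to the weighted sum
lemma pvWSum_step (cost : List (String × Int)) (d : PySem.Dict String Int) (k : String)
    (hnd : d.keys.Nodup) :
    pvWSum cost (d.insert k (d.getD k 0 + 1)).items
      = pvWSum cost d.items + (PySem.Dict.mk cost).getD k 0 := by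
  rcases hc : d.contains k with _ | _
  · rw [PySem.Dict.items_insert_of_not_contains d _ hc,
        PySem.Dict.getD_of_not_contains d _ hc]
    simp [pvWSum]
  · rw [PySem.Dict.items_insert_of_contains d _ hc]
    have hget : d.get? k = some (d.getD k 0) := by
      rcases h : d.get? k with _ | v
      · rw [PySem.Dict.contains_eq_isSome_get?, h] at hc; simp at hc
      · simp [PySem.Dict.getD_eq_get?_getD, h]
    exact pvWSum_bump cost d.items k (d.getD k 0) hnd (PySem.Dict.mem_items_of_get?_eq_some d hget)

-- the counting loop's weighted sum accumulates A's per-operation charges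
lemma pvMain (cost : List (String × Int)) (ops : List String) (d : PySem.Dict String Int)
    (hnd : d.keys.Nodup) :
    pvWSum cost (ops.foldl (fun d op => (d.insert (pvKey op) (d.getD (pvKey op) 0 + 1))) d).items
      = pvWSum cost d.items + (ops.map (fun op => (PySem.Dict.mk cost).getD (pvKey op) 0)).sum := by
  induction ops generalizing d with
  | nil => simp
  | cons op ops ih =>
    simp only [List.foldl_cons, List.map_cons, List.sum_cons]
    rw [ih _ (PySem.Dict.nodup_keys_insert d _ _ hnd), pvWSum_step cost d _ hnd]
    ring

-- ===== VERDICT (by name: the statement is the Claim_ definition above) =====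
theorem get_operations_cost_spec : Claim_equal_get_operations_cost := by
  intro operations cost _ _
  unfold Spec_get_operations_cost get_operations_cost get_operations_cost_alt
  -- A's per-operation charge is w (pvKey op)
  have hA : (fun (c : Int) (op : String) =>
      if PySem.Str.slice op none (some 7) = "replace" then
        c + (PySem.Dict.mk cost).getD "replace" 0
      else if PySem.Str.slice op none (some 6) = "insert" then
        c + (PySem.Dict.mk cost).getD "insert" 0
      else c + (PySem.Dict.mk cost).getD op 0)
      = fun c op => c + (PySem.Dict.mk cost).getD (pvKey op) 0 := by
    funext c op
    unfold pvKey
    split_ifs <;> rfl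
  rw [hA, PySem.List.foldl_add]
  -- B's counting step inserts at pvKey op
  show _ = ((operations.foldl
      (fun d op => d.insert (pvKey op) (d.getD (pvKey op) 0 + 1)) PySem.Dict.empty).items.foldl
      (fun acc p => acc + p.2 * (PySem.Dict.mk cost).getD p.1 0) 0)
  have hB := PySem.List.foldl_add
      ((operations.foldl
          (fun (d : PySem.Dict String Int) op => d.insert (pvKey op) (d.getD (pvKey op) 0 + 1))
          PySem.Dict.empty).items)
      (fun p => p.2 * (PySem.Dict.mk cost).getD p.1 0) 0
  have hM := pvMain cost operations PySem.Dict.empty PySem.Dict.nodup_keys_empty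
  simp only [pvWSum] at hM
  rw [hB, hM]
  simp [PySem.Dict.empty]
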